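-- pv_equiv track=rewrite | github.com/WenqiJiang/VGG16_FPGA_Accelerator | fixed_point/fixed_arith.py | _helper_mul_add
-- ===== SOURCE A (Python) =====
-- def unsigned_fixed_add(x1, x2):
--     """ unsigned fixed point add
--     x1, x2: string of signed fixed point number,
--             they must have the same length, e.g. 15.
--     return:
--         a tuple (carry_flag, fixed_result)
--         carry_flag: 0 or 1
--         fixed_result: string which has same bit as inputs
--     """
--     assert len(x1) == len(x2)
--     carry = 0
--     fixed_result = ''
--
--     for i in reversed(range(len(x1))):
--         if x1[i] == '0' and x2[i] == '0':
--             if carry == 1: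
--                 fixed_result += '1'
--             else:
--                 fixed_result += '0'
--             carry = 0
--         elif x1[i] == '1' and x2[i] == '1':
--             if carry == 1:
--                 fixed_result += '1'
--             else:
--                 fixed_result += '0'
--             carry = 1
--         else: # one 1 and one 0
--             if carry == 1:
--                 fixed_result += '0'
--                 carry = 1
--             else:
--                 fixed_result += '1'
--                 carry = 0
--
--     return (carry, fixed_result[::-1])
--
-- def _helper_mul_add(adder_array):
--     """ add an array of 63-bit fixed point number
--     return:
--         a 64-bit fixed point number
--     """
--     if len(adder_array) == 0:
--         return '0' * 64
--     elif len(adder_array) == 1: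
--         return '0' + adder_array[0]
--     else:
--         carry = 0
--         last_ele = adder_array[0]
--
--         for i in range(1, len(adder_array)):
--             this_carry, temp_result = unsigned_fixed_add(adder_array[i], last_ele)
--             carry += this_carry
--             last_ele = temp_result
--
--         if carry == 0:
--             result = '0' + last_ele
--         else:
--             result = '1' + last_ele
--         assert len(result) == 64
--
--         return result
-- ===== SOURCE B (Python) =====
-- def _helper_mul_add(adder_array):
--     """ add an array of 63-bit fixed point number (arithmetic re-implementation):
--     parse each bit-string once, add the integers, emit overflow flag + low 63 bits. """
--     if len(adder_array) == 0:
--         return '0' * 64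
--     elif len(adder_array) == 1:
--         return '0' + adder_array[0]
--     total = sum(int(s, 2) for s in adder_array)
--     overflow = '1' if total >= 2 ** 63 else '0'
--     return overflow + format(total % 2 ** 63, '063b')
-- ===== Notes on version B (the rewrite author's own statement) =====
-- stated objective: faster
-- what changed: Replaces the sequential pairwise ripple-carry string adder (re-scanning and rebuilding a 63-char string for every element) by one integer pass: parse each bit-string once with int(s,2), add the integers, and emit the overflow flag (total >= 2**63) plus the low 63 bits reformatted. Pre_ excludes (for lists of length >= 2) strings containing characters other than '0'/'1': B's int(s,2) raises ValueError on most of them and reads '_' digit separators differently, while A's adder treats any non-matching pair as '1 plus 0'.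
import Mathlib
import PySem

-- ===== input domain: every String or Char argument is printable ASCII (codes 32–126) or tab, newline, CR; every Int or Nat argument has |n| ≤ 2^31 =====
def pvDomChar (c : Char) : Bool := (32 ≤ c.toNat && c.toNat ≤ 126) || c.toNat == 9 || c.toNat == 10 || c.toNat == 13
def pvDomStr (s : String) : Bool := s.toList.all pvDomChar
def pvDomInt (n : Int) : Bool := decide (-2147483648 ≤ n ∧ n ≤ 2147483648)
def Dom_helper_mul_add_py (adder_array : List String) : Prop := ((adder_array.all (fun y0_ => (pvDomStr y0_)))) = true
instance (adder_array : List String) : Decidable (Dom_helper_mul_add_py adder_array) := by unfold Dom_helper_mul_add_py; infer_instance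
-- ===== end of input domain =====

-- B replaces A's pairwise ripple-carry string addition by one integer pass (parse, sum, reformat);
-- equal return values are proved on Pre_ (all-binary length-63 strings, or lists of length ≤ 1).

-- ===== PORT A =====
-- Python strings are carried as their List Char contents; '0' + s is cons, s[::-1] is reverse.
-- one iteration of unsigned_fixed_add's "for i in reversed(range(len(x1)))" loop; state = (carry, fixed_result).
-- x1[i]/x2[i] indexing is via getD: Pre_ guarantees equal lengths (Python's assert passes), so i is in range for both.
def pvUfaStep (l1 l2 : List Char) (st : Int × List Char) (i : Nat) : Int × List Char :=
  if l1.getD i ' ' = '0' ∧ l2.getD i ' ' = '0' then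
    (0, st.2 ++ [if st.1 = 1 then '1' else '0'])
  else if l1.getD i ' ' = '1' ∧ l2.getD i ' ' = '1' then
    (1, st.2 ++ [if st.1 = 1 then '1' else '0'])
  else
    (st.1, st.2 ++ [if st.1 = 1 then '0' else '1'])

def unsignedFixedAdd (x1 x2 : List Char) : Int × List Char :=
  let r := ((List.range x1.length).reverse).foldl (pvUfaStep x1 x2) (0, [])
  (r.1, r.2.reverse)

-- body of "for i in range(1, len(adder_array))": carry += this_carry; last_ele = temp_result
def pvHmaStep (st : Int × List Char) (s : String) : Int × List Char :=
  ((unsignedFixedAdd s.toList st.2).1 + st.1, (unsignedFixedAdd s.toList st.2).2)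

def helper_mul_add_py (adder_array : List String) : String :=
  if adder_array.length = 0 then String.ofList (List.replicate 64 '0')
  else if adder_array.length = 1 then String.ofList ('0' :: (PySem.List.pyGetD adder_array 0 "").toList)
  else
    let st := (PySem.List.pyRange 1 (adder_array.length : Int) 1).foldl
      (fun st j => pvHmaStep st (PySem.List.pyGetD adder_array j ""))
      (0, (PySem.List.pyGetD adder_array 0 "").toList)
    if st.1 = 0 then String.ofList ('0' :: st.2) else String.ofList ('1' :: st.2)

-- ===== PORT B =====
-- int(s, 2), ported by hand as the Horner digit loop: exact on the nonempty all-'0'/'1' strings Pre_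
-- admits (Python's general int(_, 2) features — sign, whitespace, '_', '0b' — never occur there).
def pvIntOfBin (s : String) : Int :=
  s.toList.foldl (fun a c => 2 * a + (if c = '1' then 1 else 0)) 0

-- format(m, '063b'), ported by hand: LSB-first digit recursion of fixed width 63, then reversed to
-- MSB-first; exact for 0 ≤ m < 2^63 (which Pre_ guarantees for total % 2^63).
def pvLsbBits : Nat → Nat → List Char
  | 0, _ => []
  | k+1, m => (if m % 2 = 1 then '1' else '0') :: pvLsbBits k (m / 2)

def helper_mul_add_py_alt (adder_array : List String) : String :=
  if adder_array.length = 0 then String.ofList (List.replicate 64 '0')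
  else if adder_array.length = 1 then String.ofList ('0' :: (PySem.List.pyGetD adder_array 0 "").toList)
  else
    let total := adder_array.foldl (fun a s => a + pvIntOfBin s) 0
    -- total ≥ 0 under Pre_, so Python's total % 2**63 is Nat mod
    let ov := if (2:Int)^63 ≤ total then '1' else '0'
    String.ofList (ov :: (pvLsbBits 63 (total.toNat % 2^63)).reverse)

-- ===== PRECONDITION & SPEC =====
-- Pre_ admits every list of length ≤ 1 (A returns there unconditionally) and, for longer lists, exactly
-- the all-'0'/'1' strings of length 63 (elsewhere A raises AssertionError on a wrong length, and on
-- non-binary characters B's int(s,2) raises ValueError or reads '_' separators differently — excluded,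
-- see claim cites).
def Pre_helper_mul_add_py (adder_array : List String) : Prop :=
  adder_array.length ≤ 1 ∨
    (adder_array.all fun s => s.toList.length == 63 && s.toList.all fun c => c == '0' || c == '1') = true
instance (adder_array : List String) : Decidable (Pre_helper_mul_add_py adder_array) := by
  unfold Pre_helper_mul_add_py; infer_instance

def pvWitness_helper_mul_add_py : List String :=
  ["000000000000000000000000000000000000000000000000000000000000000", "000000000000000000000000000000000000000000000000000000000000001"]

def Spec_helper_mul_add_py (adder_array : List String) (out : String) : Prop :=
  out = helper_mul_add_py_alt adder_array
instance (adder_array : List String) (out : String) : Decidable (Spec_helper_mul_add_py adder_array out) := by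
  unfold Spec_helper_mul_add_py; infer_instance

-- ===== CLAIM (what is proved, stated in full; the proofs are below) =====
def Claim_equal_helper_mul_add_py : Prop := ∀ (adder_array : List String), Dom_helper_mul_add_py adder_array → Pre_helper_mul_add_py adder_array → Spec_helper_mul_add_py adder_array (helper_mul_add_py adder_array)

-- ===== LEMMAS AND PROOFS =====

-- LSB-first value of a bit list ('1' counts 1, anything else 0)
def pvW : List Char → Nat
  | [] => 0
  | c :: t => (if c = '1' then 1 else 0) + 2 * pvW t

def pvBinary (l : List Char) : Prop := ∀ c ∈ l, c = '0' ∨ c = '1'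

theorem pvW_append_singleton (l : List Char) (c : Char) :
    pvW (l ++ [c]) = pvW l + (if c = '1' then 1 else 0) * 2 ^ l.length := by
  induction l with
  | nil => simp [pvW]
  | cons a t ih => simp [pvW, ih, pow_succ]; split_ifs <;> ring

theorem pvFoldl_horner (l : List Char) : ∀ (a : Int),
    l.foldl (fun a c => 2 * a + (if c = '1' then 1 else 0)) a
      = a * 2 ^ l.length + (pvW l.reverse : Nat) := by
  induction l with
  | nil => simp [pvW]
  | cons c t ih =>
    intro a
    simp only [List.foldl_cons, ih, List.reverse_cons, pvW_append_singleton]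
    push_cast
    simp [pow_succ, List.length_reverse]
    ring_nf
    split_ifs <;> ring

theorem pvIntOfBin_eq (s : String) :
    pvIntOfBin s = (pvW s.toList.reverse : Int) := by
  simp [pvIntOfBin, pvFoldl_horner]

theorem pvW_lt (l : List Char) : pvW l < 2 ^ l.length := by
  induction l with
  | nil => simp [pvW]
  | cons c t ih => simp [pvW, pow_succ]; split_ifs <;> omega

theorem pvLsbBits_pvW (l : List Char) (h : pvBinary l) :
    pvLsbBits l.length (pvW l) = l := by
  induction l with
  | nil => simp [pvLsbBits]
  | cons c t ih =>
    have hc := h c (by simp)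
    have ht : pvBinary t := fun x hx => h x (by simp [hx])
    rcases hc with hc | hc <;>
      simp [pvLsbBits, pvW, hc, Nat.add_mul_div_left, ih ht]
theorem pvW_pvLsbBits (k : Nat) : ∀ m, pvW (pvLsbBits k m) = m % 2 ^ k := by
  induction k with
  | zero => simp [pvLsbBits, pvW, Nat.mod_one]
  | succ k ih =>
    intro m
    have h1 : m % (2 * 2 ^ k) % 2 = m % 2 := Nat.mod_mod_of_dvd m ⟨2 ^ k, rfl⟩
    have h2 : m % (2 * 2 ^ k) / 2 = m / 2 % 2 ^ k := Nat.mod_mul_right_div_self m 2 (2 ^ k)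
    have h3 : m % (2 * 2 ^ k) = m % 2 + 2 * (m / 2 % 2 ^ k) := by
      generalize hA : m % (2 * 2 ^ k) = A at h1 h2
      omega
    simp only [pvLsbBits, pvW, ih, pow_succ']
    rw [h3]
    rcases Nat.mod_two_eq_zero_or_one m with h | h <;> simp [h]

theorem pvLsbBits_length (k : Nat) : ∀ m, (pvLsbBits k m).length = k := by
  induction k with
  | zero => simp [pvLsbBits]
  | succ k ih => intro m; simp [pvLsbBits, ih]

theorem pvLsbBits_binary (k : Nat) : ∀ m, pvBinary (pvLsbBits k m) := by
  induction k with
  | zero => intro m c hc; simp [pvLsbBits] at hc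
  | succ k ih =>
    intro m c hc
    simp only [pvLsbBits, List.mem_cons] at hc
    rcases hc with h | h
    · subst h; split_ifs <;> simp
    · exact ih _ c h

theorem pvTotal (t : List String) : ∀ (a : Int),
    t.foldl (fun a s => a + pvIntOfBin s) a = a + ((t.map (fun s => pvW s.toList.reverse)).sum : Int) := by
  induction t with
  | nil => simp
  | cons s r ih =>
    intro a
    rw [List.foldl_cons, ih, pvIntOfBin_eq]
    simp only [List.map_cons, List.sum_cons]
    push_cast
    ring

theorem pvPeelDiv (n s T : Nat) : (2*T+s)/2^(n+1) = (T+s/2)/2^n := by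
  have h1 : (2*T+s)/2 = T + s/2 := by omega
  rw [pow_succ', ← Nat.div_div_eq_div_mul, h1]

theorem pvPeelMod (n s T : Nat) :
    pvLsbBits (n+1) ((2*T+s) % 2^(n+1)) =
      (if s % 2 = 1 then '1' else '0') :: pvLsbBits n ((T+s/2) % 2^n) := by
  have h1 : (2*T+s) % 2^(n+1) % 2 = s % 2 := by
    rw [Nat.mod_mod_of_dvd _ ⟨2^n, by rw [pow_succ']⟩]; omega
  have h2 : (2*T+s) % 2^(n+1) / 2 = (T+s/2) % 2^n := by
    have := Nat.mod_mul_right_div_self (2*T+s) 2 (2^n)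
    rw [← pow_succ'] at this
    rw [this]
    congr 1
    omega
  simp only [pvLsbBits, h1, h2]

theorem pvRippleCase (n : Nat) (t1 t2 : List Char) (ht1 : t1.length = n) (ht2 : t2.length = n)
    (hb1 : pvBinary t1) (hb2 : pvBinary t2)
    (ihf : ∀ (l1 l2 : List Char), l1.length = n → l2.length = n →
      pvBinary l1 → pvBinary l2 → ∀ (c : Int) (acc : List Char), (c = 0 ∨ c = 1) →
      ((List.range n).reverse).foldl (pvUfaStep l1 l2) (c, acc) =
        ((((pvW l1.reverse + pvW l2.reverse + c.toNat) / 2 ^ n : Nat) : Int),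
          acc ++ pvLsbBits n ((pvW l1.reverse + pvW l2.reverse + c.toNat) % 2 ^ n)))
    (a b : Char) (c : Int) (s : Nat)
    (hs : (if a = '1' then 1 else 0) + (if b = '1' then 1 else 0) + c.toNat = s)
    (c' : Int) (hc' : c' = 0 ∨ c' = 1) (hcs : c'.toNat = s / 2)
    (bit : Char) (hbit : bit = if s % 2 = 1 then '1' else '0') (acc : List Char) :
    ((List.range n).reverse).foldl (pvUfaStep t1 t2) (c', acc ++ [bit]) =
      ((((pvW (t1 ++ [a]).reverse + pvW (t2 ++ [b]).reverse + c.toNat) / 2 ^ (n+1) : Nat) : Int),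
        acc ++ pvLsbBits (n+1) ((pvW (t1 ++ [a]).reverse + pvW (t2 ++ [b]).reverse + c.toNat) % 2 ^ (n+1))) := by
  have hW1 : pvW (t1 ++ [a]).reverse = (if a = '1' then 1 else 0) + 2 * pvW t1.reverse := by
    simp [pvW]
  have hW2 : pvW (t2 ++ [b]).reverse = (if b = '1' then 1 else 0) + 2 * pvW t2.reverse := by
    simp [pvW]
  have hnum : pvW (t1 ++ [a]).reverse + pvW (t2 ++ [b]).reverse + c.toNat
      = 2 * (pvW t1.reverse + pvW t2.reverse) + s := by
    rw [hW1, hW2]; omega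
  rw [ihf t1 t2 ht1 ht2 hb1 hb2 c' (acc ++ [bit]) hc', hnum, pvPeelDiv, pvPeelMod, hcs, hbit]
  simp

theorem pvRipple (n : Nat) : ∀ (l1 l2 : List Char), l1.length = n → l2.length = n →
    pvBinary l1 → pvBinary l2 → ∀ (c : Int) (acc : List Char), (c = 0 ∨ c = 1) →
    ((List.range n).reverse).foldl (pvUfaStep l1 l2) (c, acc) =
      ((((pvW l1.reverse + pvW l2.reverse + c.toNat) / 2 ^ n : Nat) : Int),
        acc ++ pvLsbBits n ((pvW l1.reverse + pvW l2.reverse + c.toNat) % 2 ^ n)) := by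
  induction n with
  | zero =>
    intro l1 l2 h1 h2 b1 b2 c acc hc
    rw [List.length_eq_zero_iff] at h1 h2
    subst h1; subst h2
    rcases hc with hc | hc <;> subst hc <;> simp [pvW, pvLsbBits]
  | succ n ih =>
    intro l1 l2 h1 h2 b1 b2 c acc hc
    have hne1 : l1 ≠ [] := by intro h; subst h; simp at h1
    have hne2 : l2 ≠ [] := by intro h; subst h; simp at h2
    obtain ⟨t1, a, rfl⟩ : ∃ t a, l1 = t ++ [a] :=
      ⟨l1.dropLast, l1.getLast hne1, (List.dropLast_append_getLast hne1).symm⟩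
    obtain ⟨t2, b, rfl⟩ : ∃ t a, l2 = t ++ [a] :=
      ⟨l2.dropLast, l2.getLast hne2, (List.dropLast_append_getLast hne2).symm⟩
    simp only [List.length_append, List.length_singleton] at h1 h2
    have ht1 : t1.length = n := by omega
    have ht2 : t2.length = n := by omega
    have hb1 : pvBinary t1 := fun x hx => b1 x (by simp [hx])
    have hb2 : pvBinary t2 := fun x hx => b2 x (by simp [hx])
    have ha : a = '0' ∨ a = '1' := b1 a (by simp)
    have hb : b = '0' ∨ b = '1' := b2 b (by simp)
    have hga : (t1 ++ [a])[n]? = some a := by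
      rw [← ht1]; exact List.getElem?_concat_length
    have hgb : (t2 ++ [b])[n]? = some b := by
      rw [← ht2]; exact List.getElem?_concat_length
    have hrange : (List.range (n+1)).reverse = n :: (List.range n).reverse := by
      simp [List.range_succ]
    have hcongr : ∀ (st : Int × List Char),
        ((List.range n).reverse).foldl (pvUfaStep (t1 ++ [a]) (t2 ++ [b])) st =
        ((List.range n).reverse).foldl (pvUfaStep t1 t2) st := by
      intro st
      apply List.foldl_ext
      intro st' i hi
      have hin : i < n := by
        have := List.mem_reverse.mp hi
        simpa [List.mem_range] using this
      have e1 : (t1 ++ [a])[i]? = t1[i]? := List.getElem?_append_left (ht1 ▸ hin)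
      have e2 : (t2 ++ [b])[i]? = t2[i]? := List.getElem?_append_left (ht2 ▸ hin)
      simp only [pvUfaStep, List.getD, e1, e2]
      rfl
    rw [hrange, List.foldl_cons, hcongr]
    rcases hc with hc | hc <;> subst hc <;>
      rcases ha with ha | ha <;> subst ha <;>
        rcases hb with hb | hb <;> subst hb
    · have hstep : pvUfaStep (t1 ++ ['0']) (t2 ++ ['0']) ((0 : Int), acc) n = ((0 : Int), acc ++ ['0']) := by
        simp [pvUfaStep, List.getD, hga, hgb]
      rw [hstep]
      exact pvRippleCase n t1 t2 ht1 ht2 hb1 hb2 ih '0' '0' 0 0 (by decide) 0 (by norm_num) (by decide) '0' (by decide) acc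
    · have hstep : pvUfaStep (t1 ++ ['0']) (t2 ++ ['1']) ((0 : Int), acc) n = ((0 : Int), acc ++ ['1']) := by
        simp [pvUfaStep, List.getD, hga, hgb]
      rw [hstep]
      exact pvRippleCase n t1 t2 ht1 ht2 hb1 hb2 ih '0' '1' 0 1 (by decide) 0 (by norm_num) (by decide) '1' (by decide) acc
    · have hstep : pvUfaStep (t1 ++ ['1']) (t2 ++ ['0']) ((0 : Int), acc) n = ((0 : Int), acc ++ ['1']) := by
        simp [pvUfaStep, List.getD, hga, hgb]
      rw [hstep]
      exact pvRippleCase n t1 t2 ht1 ht2 hb1 hb2 ih '1' '0' 0 1 (by decide) 0 (by norm_num) (by decide) '1' (by decide) acc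
    · have hstep : pvUfaStep (t1 ++ ['1']) (t2 ++ ['1']) ((0 : Int), acc) n = ((1 : Int), acc ++ ['0']) := by
        simp [pvUfaStep, List.getD, hga, hgb]
      rw [hstep]
      exact pvRippleCase n t1 t2 ht1 ht2 hb1 hb2 ih '1' '1' 0 2 (by decide) 1 (by norm_num) (by decide) '0' (by decide) acc
    · have hstep : pvUfaStep (t1 ++ ['0']) (t2 ++ ['0']) ((1 : Int), acc) n = ((0 : Int), acc ++ ['1']) := by
        simp [pvUfaStep, List.getD, hga, hgb]
      rw [hstep]
      exact pvRippleCase n t1 t2 ht1 ht2 hb1 hb2 ih '0' '0' 1 1 (by decide) 0 (by norm_num) (by decide) '1' (by decide) acc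
    · have hstep : pvUfaStep (t1 ++ ['0']) (t2 ++ ['1']) ((1 : Int), acc) n = ((1 : Int), acc ++ ['0']) := by
        simp [pvUfaStep, List.getD, hga, hgb]
      rw [hstep]
      exact pvRippleCase n t1 t2 ht1 ht2 hb1 hb2 ih '0' '1' 1 2 (by decide) 1 (by norm_num) (by decide) '0' (by decide) acc
    · have hstep : pvUfaStep (t1 ++ ['1']) (t2 ++ ['0']) ((1 : Int), acc) n = ((1 : Int), acc ++ ['0']) := by
        simp [pvUfaStep, List.getD, hga, hgb]
      rw [hstep]
      exact pvRippleCase n t1 t2 ht1 ht2 hb1 hb2 ih '1' '0' 1 2 (by decide) 1 (by norm_num) (by decide) '0' (by decide) acc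
    · have hstep : pvUfaStep (t1 ++ ['1']) (t2 ++ ['1']) ((1 : Int), acc) n = ((1 : Int), acc ++ ['1']) := by
        simp [pvUfaStep, List.getD, hga, hgb]
      rw [hstep]
      exact pvRippleCase n t1 t2 ht1 ht2 hb1 hb2 ih '1' '1' 1 3 (by decide) 1 (by norm_num) (by decide) '1' (by decide) acc

theorem pvUfa_spec (l1 l2 : List Char) (n : Nat) (h1 : l1.length = n) (h2 : l2.length = n)
    (b1 : pvBinary l1) (b2 : pvBinary l2) :
    unsignedFixedAdd l1 l2 =
      ((((pvW l1.reverse + pvW l2.reverse) / 2 ^ n : Nat) : Int),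
        (pvLsbBits n ((pvW l1.reverse + pvW l2.reverse) % 2 ^ n)).reverse) := by
  unfold unsignedFixedAdd
  rw [h1, pvRipple n l1 l2 h1 h2 b1 b2 0 [] (Or.inl rfl)]
  simp

theorem pvOuter (t : List String) (h : ∀ s ∈ t, s.toList.length = 63 ∧ pvBinary s.toList) :
    ∀ (S : Nat),
    t.foldl pvHmaStep (((S / 2 ^ 63 : Nat) : Int), (pvLsbBits 63 (S % 2 ^ 63)).reverse) =
      ((((S + (t.map (fun s => pvW s.toList.reverse)).sum) / 2 ^ 63 : Nat) : Int),
        (pvLsbBits 63 ((S + (t.map (fun s => pvW s.toList.reverse)).sum) % 2 ^ 63)).reverse) := by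
  induction t with
  | nil => simp
  | cons s r ih =>
    intro S
    have hs := h s (by simp)
    have hr : ∀ x ∈ r, x.toList.length = 63 ∧ pvBinary x.toList := fun x hx => h x (by simp [hx])
    rw [List.foldl_cons]
    have hlast_len : ((pvLsbBits 63 (S % 2 ^ 63)).reverse).length = 63 := by
      simp [pvLsbBits_length]
    have hlast_bin : pvBinary ((pvLsbBits 63 (S % 2 ^ 63)).reverse) := by
      intro c hc
      exact pvLsbBits_binary 63 _ c (List.mem_reverse.mp hc)
    have hstep : pvHmaStep (((S / 2 ^ 63 : Nat) : Int), (pvLsbBits 63 (S % 2 ^ 63)).reverse) s =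
        ((((S + pvW s.toList.reverse) / 2 ^ 63 : Nat) : Int),
          (pvLsbBits 63 ((S + pvW s.toList.reverse) % 2 ^ 63)).reverse) := by
      unfold pvHmaStep
      rw [pvUfa_spec s.toList _ 63 hs.1 hlast_len hs.2 hlast_bin]
      have hWlast : pvW ((pvLsbBits 63 (S % 2 ^ 63)).reverse).reverse = S % 2 ^ 63 := by
        rw [List.reverse_reverse, pvW_pvLsbBits]
        omega
      rw [hWlast]
      have hm : (2:Nat) ^ 63 = 9223372036854775808 := by norm_num
      have hdiv : (pvW s.toList.reverse + S % 2 ^ 63) / 2 ^ 63 + S / 2 ^ 63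
          = (S + pvW s.toList.reverse) / 2 ^ 63 := by rw [hm]; omega
      have hmod : (pvW s.toList.reverse + S % 2 ^ 63) % 2 ^ 63
          = (S + pvW s.toList.reverse) % 2 ^ 63 := by rw [hm]; omega
      rw [hmod]
      refine Prod.ext ?_ rfl
      dsimp only
      exact_mod_cast hdiv
    rw [hstep, ih hr]
    have : S + pvW s.toList.reverse + ((r.map (fun s => pvW s.toList.reverse)).sum)
        = S + ((s :: r).map (fun s => pvW s.toList.reverse)).sum := by
      simp; ring
    rw [this]


-- ===== VERDICT (by name: the statement is the Claim_ definition above) =====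

theorem pvHall (a : List String)
    (h : (a.all fun s => s.toList.length == 63 && s.toList.all fun c => c == '0' || c == '1') = true) :
    ∀ s ∈ a, s.toList.length = 63 ∧ pvBinary s.toList := by
  rw [List.all_eq_true] at h
  intro s hs
  have := h s hs
  rw [Bool.and_eq_true, beq_iff_eq, List.all_eq_true] at this
  refine ⟨this.1, fun c hc => ?_⟩
  have := this.2 c hc
  rw [Bool.or_eq_true, beq_iff_eq, beq_iff_eq] at this
  exact this

theorem helper_mul_add_py_spec : Claim_equal_helper_mul_add_py := by
  intro a _ hpre
  unfold Spec_helper_mul_add_py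
  match a with
  | [] => rfl
  | [x] => rfl
  | x :: y :: r =>
    have hall : ∀ s ∈ x :: y :: r, s.toList.length = 63 ∧ pvBinary s.toList := by
      rcases hpre with h | h
      · simp at h
      · exact pvHall _ h
    have hx := hall x (by simp)
    unfold helper_mul_add_py helper_mul_add_py_alt
    rw [PySem.List.foldl_pyRange_pyGetD' (x :: y :: r) "" pvHmaStep _ (by norm_num)]
    have h0 : ((x :: y :: r).length = 0) = False := by simp
    have h1 : ((x :: y :: r).length = 1) = False := by simp
    simp only [h0, h1, if_false, Int.toNat_one, List.drop_succ_cons, List.drop_zero,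
      PySem.List.pyGetD_zero_cons]
    have hxb : pvBinary x.toList.reverse := fun c hc => hx.2 c (List.mem_reverse.mp hc)
    have hS0lt : pvW x.toList.reverse < 2 ^ 63 := by
      have := pvW_lt x.toList.reverse
      rwa [List.length_reverse, hx.1] at this
    have hinit : ((0 : Int), x.toList) =
        (((pvW x.toList.reverse / 2 ^ 63 : Nat) : Int),
          (pvLsbBits 63 (pvW x.toList.reverse % 2 ^ 63)).reverse) := by
      have hd : pvW x.toList.reverse / 2 ^ 63 = 0 := Nat.div_eq_of_lt hS0lt
      have hm : pvW x.toList.reverse % 2 ^ 63 = pvW x.toList.reverse := Nat.mod_eq_of_lt hS0lt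
      have hc : pvLsbBits 63 (pvW x.toList.reverse) = x.toList.reverse := by
        have := pvLsbBits_pvW x.toList.reverse hxb
        rwa [List.length_reverse, hx.1] at this
      rw [hd, hm, hc, List.reverse_reverse]
      simp
    rw [hinit, pvOuter (y :: r) (fun s hs => hall s (List.mem_cons_of_mem _ hs)),
      pvTotal (x :: y :: r) 0]
    have hsum : (List.map (fun s => pvW s.toList.reverse) (x :: y :: r)).sum
        = pvW x.toList.reverse + (List.map (fun s => pvW s.toList.reverse) (y :: r)).sum := by
      simp
    rw [hsum]
    set T := pvW x.toList.reverse + (List.map (fun s => pvW s.toList.reverse) (y :: r)).sum with hTdef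
    have htn : ((0 : Int) + (T : Int)).toNat = T := by simp
    rw [htn]
    dsimp only
    by_cases hlt : T < 2 ^ 63
    · rw [if_pos (show ((T / 2 ^ 63 : Nat) : Int) = 0 by exact_mod_cast Nat.div_eq_of_lt hlt),
        if_neg (show ¬ ((2 : Int) ^ 63 ≤ 0 + (T : Int)) by rw [zero_add]; exact_mod_cast Nat.not_le.mpr hlt)]
    · rw [if_neg (show ¬ ((T / 2 ^ 63 : Nat) : Int) = 0 by
          have hp : 0 < T / 2 ^ 63 := Nat.div_pos (Nat.le_of_not_lt hlt) (by positivity)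
          exact_mod_cast hp.ne'),
        if_pos (show (2 : Int) ^ 63 ≤ 0 + (T : Int) by rw [zero_add]; exact_mod_cast Nat.le_of_not_lt hlt)]
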